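-- pv_equiv track=rewrite | github.com/YoelTavger/info4Car_bot | ocr_service.py | _normalize_plate_number
-- ===== SOURCE A (Python) =====
-- def _normalize_plate_number(plate_text):
--     """
--     נרמול מספר לוחית רישוי
--
--     Args:
--         plate_text: טקסט הלוחית
--
--     Returns:
--         str: מספר לוחית מנורמל
--     """
--     # הסרת תווים לא רצויים
--     plate_text = ''.join(c for c in plate_text if c.isalnum())
--
--     # אם הלוחית מכילה יותר מדי או מעט מדי תווים, ייתכן שזו שגיאת זיהוי
--     if len(plate_text) < 5 or len(plate_text) > 10:
--         return plate_text
--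
--     # זיהוי לוחיות ישראליות טיפוסיות
--     # אם יש מספר 7 או 8 ספרות, זו כנראה לוחית ישראלית חדשה
--     if len(plate_text) in [6, 7, 8] and plate_text.isdigit():
--         # פורמט לוחית ישראלית חדשה: XX-XXX-XX
--         if len(plate_text) == 7:
--             return plate_text[:2] + '-' + plate_text[2:5] + '-' + plate_text[5:]
--         elif len(plate_text) == 8:  # 8 ספרות
--             return plate_text[:3] + '-' + plate_text[3:5] + '-' + plate_text[5:]
--         else:  # 6 ספרות
--             return plate_text[:2] + '-' + plate_text[2:5] + '-' + plate_text[5:]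
--
--     return plate_text
-- ===== SOURCE B (Python) =====
-- def _normalize_plate_number(plate_text):
--     # Single filtering pass that also tracks whether every kept char is a digit,
--     # then one index-driven emit pass that inserts dashes at the cut positions.
--     kept = []
--     all_digits = True
--     for c in plate_text:
--         if c.isalnum():
--             kept.append(c)
--             if not c.isdigit():
--                 all_digits = False
--     n = len(kept)
--     if 6 <= n <= 8 and all_digits:
--         cuts = (3, 5) if n == 8 else (2, 5)
--         out = []
--         for i, c in enumerate(kept):
--             if i in cuts:
--                 out.append('-')
--             out.append(c)
--         return ''.join(out)
--     return ''.join(kept)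
-- ===== Notes on version B (the rewrite author's own statement) =====
-- stated objective: alternative
-- what changed: Replaces A's staged filter + isdigit scan + three-way slice-and-concatenate branches with one filtering pass that simultaneously tracks an all-digits flag, then a single index-driven emit pass that inserts dashes at the cut positions while copying characters.
import Mathlib
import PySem

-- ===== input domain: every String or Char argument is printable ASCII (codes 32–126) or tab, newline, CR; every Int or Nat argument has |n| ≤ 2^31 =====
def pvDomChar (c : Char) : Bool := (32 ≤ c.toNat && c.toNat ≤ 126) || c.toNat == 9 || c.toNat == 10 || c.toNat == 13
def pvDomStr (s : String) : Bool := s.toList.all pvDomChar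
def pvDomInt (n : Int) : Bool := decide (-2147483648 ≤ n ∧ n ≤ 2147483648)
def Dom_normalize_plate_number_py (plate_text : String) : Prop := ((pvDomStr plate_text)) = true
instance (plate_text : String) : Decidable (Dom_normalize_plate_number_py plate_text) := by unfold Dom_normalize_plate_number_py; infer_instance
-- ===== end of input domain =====

-- B replaces A's filter/guard/slice-concatenation staging by one filtering pass that also tracks
-- all-digits, then an index-driven emit pass inserting dashes at the cut positions (objective: alternative).
-- Python string building is ported on List Char with String.ofList at the end (exact; Lean's String.append is kernel-opaque).

-- ===== PORT A =====
-- body of A after the alnum filter, over the filtered code points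
def pvBodyA (cs : List Char) : List Char :=
  if cs.length < 5 || 10 < cs.length then cs
  else if (cs.length == 6 || cs.length == 7 || cs.length == 8) && PySem.Chars.strIsdigit cs then
    if cs.length == 7 then
      PySem.List.slice cs none (some 2) ++ '-' :: (PySem.List.slice cs (some 2) (some 5) ++ '-' :: PySem.List.slice cs (some 5) none)
    else if cs.length == 8 then
      PySem.List.slice cs none (some 3) ++ '-' :: (PySem.List.slice cs (some 3) (some 5) ++ '-' :: PySem.List.slice cs (some 5) none)
    else
      PySem.List.slice cs none (some 2) ++ '-' :: (PySem.List.slice cs (some 2) (some 5) ++ '-' :: PySem.List.slice cs (some 5) none)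
  else cs

def normalize_plate_number_py (plate_text : String) : String :=
  String.ofList (pvBodyA (plate_text.toList.filter (fun c => PySem.Chars.isalnum c)))

-- ===== PORT B =====
-- the filtering loop of Source B: state (kept, all_digits)
def pvScanB (st : List Char × Bool) (c : Char) : List Char × Bool :=
  if PySem.Chars.isalnum c then
    (st.1 ++ [c], if !PySem.Chars.isdigit c then false else st.2)
  else st

-- the emit loop body of Source B: insert '-' before positions in cuts, then the char
def pvEmitB (cuts : Int × Int) (out : List Char) (ic : Int × Char) : List Char :=
  (if ic.1 == cuts.1 || ic.1 == cuts.2 then out ++ ['-'] else out) ++ [ic.2]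

def normalize_plate_number_py_alt (plate_text : String) : String :=
  let st := plate_text.toList.foldl pvScanB ([], true)
  let n := st.1.length
  if (6 ≤ n && n ≤ 8) && st.2 then
    let cuts : Int × Int := if n = 8 then (3, 5) else (2, 5)
    String.ofList ((PySem.List.enumerate st.1).foldl (pvEmitB cuts) [])
  else String.ofList st.1

-- ===== PRECONDITION & SPEC =====
def Spec_normalize_plate_number_py (plate_text : String) (out : String) : Prop := out = normalize_plate_number_py_alt plate_text
instance (plate_text : String) (out : String) : Decidable (Spec_normalize_plate_number_py plate_text out) := by unfold Spec_normalize_plate_number_py; infer_instance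

-- ===== CLAIM (what is proved, stated in full; the proofs are below) =====
def Claim_equal_normalize_plate_number_py : Prop := ∀ (plate_text : String), Dom_normalize_plate_number_py plate_text → Spec_normalize_plate_number_py plate_text (normalize_plate_number_py plate_text)

-- ===== LEMMAS AND PROOFS =====

-- the scan loop computes the alnum filter plus the all-digits flag of the filtered chars
lemma pvScanB_eq (cs : List Char) (acc : List Char) (ad : Bool) :
    cs.foldl pvScanB (acc, ad)
      = (acc ++ cs.filter (fun c => PySem.Chars.isalnum c),
         ad && (cs.filter (fun c => PySem.Chars.isalnum c)).all PySem.Chars.isdigit) := by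
  induction cs generalizing acc ad with
  | nil => simp
  | cons c cs ih =>
    simp only [List.foldl_cons, pvScanB]
    by_cases h : PySem.Chars.isalnum c = true
    · rw [if_pos h, ih, List.filter_cons_of_pos h]
      simp only [List.all_cons, Prod.mk.injEq]
      refine ⟨by simp, ?_⟩
      cases hd : PySem.Chars.isdigit c <;> simp
    · rw [if_neg h, ih, List.filter_cons_of_neg (by simpa using h)]

-- the two post-filter bodies agree on every filtered list
lemma pvBody_eq (ks : List Char) :
    pvBodyA ks
      = (if (6 ≤ ks.length && ks.length ≤ 8) && ks.all PySem.Chars.isdigit then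
           (PySem.List.enumerate ks).foldl
             (pvEmitB (if ks.length = 8 then ((3 : Int), (5 : Int)) else (2, 5))) []
         else ks) := by
  by_cases hd : ks.all PySem.Chars.isdigit = true
  · by_cases h6 : ks.length = 6
    · rcases ks with _ | ⟨a, _ | ⟨b, _ | ⟨c, _ | ⟨d, _ | ⟨e, _ | ⟨f, tl⟩⟩⟩⟩⟩⟩ <;>
        simp_all [pvBodyA, PySem.Chars.strIsdigit, PySem.List.slice, PySem.List.enumerate,
          pvEmitB]
    · by_cases h7 : ks.length = 7
      · rcases ks with _ | ⟨a, _ | ⟨b, _ | ⟨c, _ | ⟨d, _ | ⟨e, _ | ⟨f, _ | ⟨g, tl⟩⟩⟩⟩⟩⟩⟩ <;>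
          simp_all [pvBodyA, PySem.Chars.strIsdigit, PySem.List.slice, PySem.List.enumerate,
            pvEmitB]
      · by_cases h8 : ks.length = 8
        · rcases ks with _ | ⟨a, _ | ⟨b, _ | ⟨c, _ | ⟨d, _ | ⟨e, _ | ⟨f, _ | ⟨g, _ | ⟨h, tl⟩⟩⟩⟩⟩⟩⟩⟩ <;>
            simp_all [pvBodyA, PySem.Chars.strIsdigit, PySem.List.slice, PySem.List.enumerate,
              pvEmitB]
        · have hg : ¬ ((6 ≤ ks.length && ks.length ≤ 8) && ks.all PySem.Chars.isdigit) = true := by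
            simp only [Bool.and_eq_true, decide_eq_true_eq]
            rintro ⟨⟨h1, h2⟩, -⟩; omega
          simp only [hg, if_neg, Bool.not_eq_true] at *
          unfold pvBodyA
          have : ((ks.length == 6 || ks.length == 7 || ks.length == 8)
              && PySem.Chars.strIsdigit ks) = false ∨ (ks.length < 5 || 10 < ks.length) = true := by
            by_cases hlen : ks.length < 5 ∨ 10 < ks.length
            · right; simpa [Bool.or_eq_true, decide_eq_true_eq] using hlen
            · left
              have : ¬ (ks.length = 6 ∨ ks.length = 7 ∨ ks.length = 8) := by tauto
              simp only [Bool.and_eq_false_iff, Bool.or_eq_false_iff, beq_eq_false_iff_ne]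
              left; tauto
          rcases this with h | h
          · split_ifs with g1 g2 <;> simp_all
          · simp [h]
  · -- not all digits: A's isdigit guard is false too
    have hA : PySem.Chars.strIsdigit ks = false := by
      unfold PySem.Chars.strIsdigit
      cases h : ks.all PySem.Chars.isdigit
      · simp
      · exact absurd h hd
    have hB : ((6 ≤ ks.length && ks.length ≤ 8) && ks.all PySem.Chars.isdigit) = false := by
      cases h : ks.all PySem.Chars.isdigit
      · simp
      · exact absurd h hd
    simp [pvBodyA, hA, hB]

-- ===== VERDICT (by name: the statement is the Claim_ definition above) =====
theorem normalize_plate_number_py_spec : Claim_equal_normalize_plate_number_py := by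
  intro s _
  unfold Spec_normalize_plate_number_py normalize_plate_number_py normalize_plate_number_py_alt
  rw [pvScanB_eq]
  simp only [List.nil_append, Bool.true_and]
  rw [pvBody_eq]
  exact apply_ite String.ofList _ _ _
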